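-- pv_equiv track=rewrite | github.com/DoreenP8387631eggy/csv-surgeon | csv_surgeon/linker.py | link_count
-- ===== SOURCE A (Python) =====
-- from typing import Iterator, Dict, List, Optional
--
-- def _index(rows: Iterator[Dict], key: str) -> Dict[str, List[Dict]]:
--     index: Dict[str, List[Dict]] = {}
--     for row in rows:
--         k = row.get(key, "")
--         index.setdefault(k, []).append(row)
--     return index
--
-- def link_count(
--     left_rows: Iterator[Dict],
--     right_rows: Iterator[Dict],
--     left_key: str,
--     right_key: str,
--     output_col: str = "link_count",
-- ) -> Iterator[Dict]:
--     """Attach the count of matching right rows to each left row."""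
--     index = _index(right_rows, right_key)
--     for row in left_rows:
--         k = row.get(left_key, "")
--         count = len(index.get(k, []))
--         yield {**row, output_col: str(count)}
-- ===== SOURCE B (Python) =====
-- def link_count(left_rows, right_rows, left_key, right_key, output_col="link_count"):
--     """Attach the count of matching right rows to each left row (nested-loop join)."""
--     right = list(right_rows)
--     for row in left_rows:
--         k = row.get(left_key, "")
--         count = sum(1 for r in right if r.get(right_key, "") == k)
--         yield {**row, output_col: str(count)}
-- ===== Notes on version B (the rewrite author's own statement) =====
-- stated objective: simpler
-- what changed: Drops the _index helper and its grouping dict entirely: B materializes the right rows once and computes each count with a direct linear scan (nested-loop join) instead of building and querying a hash index of row lists.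
import Mathlib
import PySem

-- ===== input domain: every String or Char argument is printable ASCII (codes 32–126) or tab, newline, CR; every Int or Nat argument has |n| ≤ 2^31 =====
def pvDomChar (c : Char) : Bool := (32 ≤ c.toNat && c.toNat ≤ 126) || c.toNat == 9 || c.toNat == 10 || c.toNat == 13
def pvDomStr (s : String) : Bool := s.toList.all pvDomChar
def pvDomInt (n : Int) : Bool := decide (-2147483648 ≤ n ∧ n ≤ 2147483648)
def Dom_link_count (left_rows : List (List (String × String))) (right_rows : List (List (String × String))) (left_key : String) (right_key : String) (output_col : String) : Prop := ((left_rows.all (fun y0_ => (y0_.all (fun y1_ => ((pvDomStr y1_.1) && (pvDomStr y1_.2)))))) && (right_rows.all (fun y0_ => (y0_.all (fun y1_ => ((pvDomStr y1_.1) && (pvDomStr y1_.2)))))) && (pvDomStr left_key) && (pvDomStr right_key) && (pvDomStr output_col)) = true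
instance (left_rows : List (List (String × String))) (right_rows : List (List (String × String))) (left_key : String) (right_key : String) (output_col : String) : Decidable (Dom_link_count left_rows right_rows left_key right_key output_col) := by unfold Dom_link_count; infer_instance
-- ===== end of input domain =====

-- B replaces A's hash index (_index grouping dict) by a direct linear scan of the right rows per left row (nested-loop join); same outputs, simpler decomposition.
-- ===== PORT A =====
-- helper _index: groups right rows by their right_key value (setdefault(k, []).append(row))
def pvIndex (rows : List (List (String × String))) (key : String) : PySem.Dict String (List (List (String × String))) :=
  rows.foldl (fun d row => d.modify ((PySem.Dict.mk row).getD key "") [] (fun l => l ++ [row])) PySem.Dict.empty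

def link_count (left_rows : List (List (String × String))) (right_rows : List (List (String × String))) (left_key : String) (right_key : String) (output_col : String) : List (List (String × String)) :=
  let index := pvIndex right_rows right_key
  left_rows.map (fun row =>
    let k := (PySem.Dict.mk row).getD left_key ""
    let count := (index.getD k []).length
    ((PySem.Dict.mk row).insert output_col (PySem.Int.toStr (count : Int))).items)

-- ===== PORT B =====
def link_count_alt (left_rows : List (List (String × String))) (right_rows : List (List (String × String))) (left_key : String) (right_key : String) (output_col : String) : List (List (String × String)) :=
  left_rows.map (fun row =>
    let k := (PySem.Dict.mk row).getD left_key ""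
    let count := (right_rows.map (fun r => if (PySem.Dict.mk r).getD right_key "" == k then (1 : Int) else 0)).sum
    ((PySem.Dict.mk row).insert output_col (PySem.Int.toStr count)).items)

-- ===== PRECONDITION & SPEC =====
def Spec_link_count (left_rows : List (List (String × String))) (right_rows : List (List (String × String))) (left_key : String) (right_key : String) (output_col : String) (out : List (List (String × String))) : Prop := out = link_count_alt left_rows right_rows left_key right_key output_col
instance (left_rows : List (List (String × String))) (right_rows : List (List (String × String))) (left_key : String) (right_key : String) (output_col : String) (out : List (List (String × String))) : Decidable (Spec_link_count left_rows right_rows left_key right_key output_col out) := by unfold Spec_link_count; infer_instance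

-- ===== CLAIM (what is proved, stated in full; the proofs are below) =====
def Claim_equal_link_count : Prop := ∀ (left_rows : List (List (String × String))) (right_rows : List (List (String × String))) (left_key : String) (right_key : String) (output_col : String), Dom_link_count left_rows right_rows left_key right_key output_col → Spec_link_count left_rows right_rows left_key right_key output_col (link_count left_rows right_rows left_key right_key output_col)

-- ===== LEMMAS AND PROOFS =====

-- ===== VERDICT (by name: the statement is the Claim_ definition above) =====
-- the length of the index bucket for k equals the nested-loop 0/1 sum over the right rows
lemma pvIndex_getD_length (rows : List (List (String × String))) (key : String) (k : String) :
    (((pvIndex rows key).getD k []).length : Int)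
      = (rows.map (fun r => if (PySem.Dict.mk r).getD key "" == k then (1 : Int) else 0)).sum := by
  have h1 : pvIndex rows key
      = (rows.map (fun r => (((PySem.Dict.mk r).getD key ""), r))).foldl
          (fun d p => d.modify p.1 [] (fun l => l ++ [p.2])) PySem.Dict.empty := by
    rw [List.foldl_map]
    rfl
  rw [h1, PySem.Dict.getD_foldl_modify_append, PySem.List.sum_map_ite_one_zero]
  simp only [PySem.Dict.getD_empty, List.nil_append, List.length_map,
    List.countP_eq_length_filter, List.filter_map]
  rfl

theorem link_count_spec : Claim_equal_link_count := by
  intro left_rows right_rows left_key right_key output_col _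
  unfold Spec_link_count link_count link_count_alt
  simp only []
  apply List.map_congr_left
  intro row _
  rw [pvIndex_getD_length]
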